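-- pv_equiv track=rewrite | github.com/imiskii/VUT-FIT | IPP (Principles of Programming Languages)/Project/instructions.py | evalEscapeSeq
-- ===== SOURCE A (Python) =====
-- def evalEscapeSeq(string:str) -> str:
--     """
--     Method evaluates all escape seqeunces in given string
--
--     Parameters
--     ----------
--     string : str
--         string to be proccessed
--
--     Return
--     ----------
--     String with replaced escape sequences
--     """
--     i = 0
--     result = ''
--     while i < len(string):
--         if string[i] == '\\':
--             result = result + chr(int(string[i+1:i+4]))
--             i += 3
--         else:
--             result = result + string[i]
--         i += 1
--
--     return result
-- ===== SOURCE B (Python) =====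
-- def evalEscapeSeq(string: str) -> str:
--     parts = []
--     i = 0
--     while True:
--         j = string.find('\\', i)
--         if j == -1:
--             parts.append(string[i:])
--             break
--         parts.append(string[i:j])
--         parts.append(chr(int(string[j+1:j+4])))
--         i = j + 4
--     return ''.join(parts)
-- ===== Notes on version B (the rewrite author's own statement) =====
-- stated objective: faster
-- what changed: Instead of walking character by character and rebuilding the result string by repeated concatenation, B scans with str.find for the next backslash, copies whole literal chunks between escapes into a list, and joins once at the end.
import Mathlib
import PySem

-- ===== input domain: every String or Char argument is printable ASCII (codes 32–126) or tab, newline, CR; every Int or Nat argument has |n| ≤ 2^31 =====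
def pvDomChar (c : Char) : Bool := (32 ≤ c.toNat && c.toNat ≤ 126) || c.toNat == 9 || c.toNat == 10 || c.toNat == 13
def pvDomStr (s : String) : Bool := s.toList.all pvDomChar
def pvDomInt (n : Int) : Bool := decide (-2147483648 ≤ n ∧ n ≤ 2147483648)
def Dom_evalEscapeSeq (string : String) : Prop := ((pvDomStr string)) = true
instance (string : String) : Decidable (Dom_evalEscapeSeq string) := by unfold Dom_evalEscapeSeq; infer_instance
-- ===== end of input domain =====

-- B replaces A's character-by-character walk with repeated string concatenation by a
-- find-the-next-backslash scan that copies whole literal chunks and joins once (faster).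

-- ===== PORT A =====
-- chr(int(...)) is Char.ofNat of PySem.Int.ofStr? in both ports; on Pre_ the parse always
-- succeeds with a nonnegative value, so the getD 0 / toNat fallbacks are never taken there.
-- A: i walks one char at a time; at '\', consume the next 3 chars (slice clamps) and emit chr(int(...)).
def evalEscapeSeqGo (cs : List Char) : List Char :=
  match cs with
  | [] => []
  | c :: rest =>
    if c = '\\' then Char.ofNat (((PySem.Int.ofStr? (String.ofList (rest.take 3))).getD 0).toNat) :: evalEscapeSeqGo (rest.drop 3)
    else c :: evalEscapeSeqGo rest
termination_by cs.length
decreasing_by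
  · simp only [List.length_cons, List.length_drop]; omega
  · simp only [List.length_cons]; omega

def evalEscapeSeq (string : String) : String := String.ofList (evalEscapeSeqGo string.toList)

-- ===== PORT B =====
-- B: find the next backslash (takeWhile/dropWhile = the literal chunk up to it and the rest);
-- if none, the tail chunk ends the result; else emit chunk, chr(int(next 3 chars)), continue after them.
def evalEscapeSeqAltGo (cs : List Char) : List Char :=
  let chunk := cs.takeWhile (· ≠ '\\')
  let rest := cs.dropWhile (· ≠ '\\')
  if hr : rest = [] then chunk
  else chunk ++ Char.ofNat (((PySem.Int.ofStr? (String.ofList (rest.tail.take 3))).getD 0).toNat) :: evalEscapeSeqAltGo (rest.tail.drop 3)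
termination_by cs.length
decreasing_by
  have hle : rest.length ≤ cs.length := List.length_dropWhile_le _ _
  have hrw : rest.length = (List.dropWhile (fun x => decide (x ≠ '\\')) cs).length := rfl
  have hpos : 0 < rest.length := List.length_pos_iff.mpr hr
  simp only [List.length_drop, List.length_tail]
  omega

def evalEscapeSeq_alt (string : String) : String := String.ofList (evalEscapeSeqAltGo string.toList)

-- ===== PRECONDITION & SPEC =====
-- Pre_ excludes exactly the inputs on which Python A raises: at some backslash, int() on the
-- three-character slice after it raises ValueError (unparsable or backslash at the end), or
-- it parses to a negative value on which chr() raises ValueError. B raises there too.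
def Pre_evalEscapeSeq (string : String) : Prop :=
  ∀ i : Nat, i < string.toList.length → string.toList.getD i ' ' = '\\' →
    0 ≤ (PySem.Int.ofStr? (String.ofList ((string.toList.drop (i+1)).take 3))).getD (-1)
instance (string : String) : Decidable (Pre_evalEscapeSeq string) := by
  unfold Pre_evalEscapeSeq; infer_instance
def pvWitness_evalEscapeSeq : String := "ab\\065c"

def Spec_evalEscapeSeq (string : String) (out : String) : Prop := out = evalEscapeSeq_alt string
instance (string : String) (out : String) : Decidable (Spec_evalEscapeSeq string out) := by unfold Spec_evalEscapeSeq; infer_instance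

-- ===== CLAIM (what is proved, stated in full; the proofs are below) =====
def Claim_equal_evalEscapeSeq : Prop := ∀ (string : String), Dom_evalEscapeSeq string → Pre_evalEscapeSeq string → Spec_evalEscapeSeq string (evalEscapeSeq string)

-- ===== LEMMAS AND PROOFS =====

-- B's chunk recursion satisfies A's per-character recurrence, so the two agree everywhere.
theorem altGo_cons_ne (c : Char) (cs : List Char) (h : c ≠ '\\') :
    evalEscapeSeqAltGo (c :: cs) = c :: evalEscapeSeqAltGo cs := by
  unfold evalEscapeSeqAltGo
  simp only [List.takeWhile_cons, List.dropWhile_cons, h, decide_true, decide_false,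
    decide_not, Bool.not_false, if_true, Bool.not_eq_eq_eq_not]
  by_cases hr : List.dropWhile (fun x => !decide (x = '\\')) cs = [] <;>
    simp [hr, h]

theorem altGo_cons_bs (cs : List Char) :
    evalEscapeSeqAltGo ('\\' :: cs) =
      Char.ofNat (((PySem.Int.ofStr? (String.ofList (cs.take 3))).getD 0).toNat) :: evalEscapeSeqAltGo (cs.drop 3) := by
  conv_lhs => rw [evalEscapeSeqAltGo]
  simp [List.takeWhile_cons, List.dropWhile_cons]

theorem go_eq_altGo (cs : List Char) : evalEscapeSeqGo cs = evalEscapeSeqAltGo cs := by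
  induction cs using evalEscapeSeqGo.induct with
  | case1 => unfold evalEscapeSeqGo evalEscapeSeqAltGo; simp
  | case2 rest ih =>
    rw [evalEscapeSeqGo, if_pos rfl, altGo_cons_bs, ih]
  | case3 c rest hc ih =>
    rw [evalEscapeSeqGo, if_neg hc, altGo_cons_ne c rest hc, ih]

-- ===== VERDICT (by name: the statement is the Claim_ definition above) =====
theorem evalEscapeSeq_spec : Claim_equal_evalEscapeSeq := by
  intro s _ _
  unfold Spec_evalEscapeSeq evalEscapeSeq evalEscapeSeq_alt
  rw [go_eq_altGo]
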